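-- pv_equiv track=rewrite | github.com/jaskaranksingh/GeneticBPE | genetic_bpe/utils.py | visualize_tokenization
-- ===== SOURCE A (Python) =====
-- from typing import List, Dict, Set
--
-- def visualize_tokenization(
--     sequence: str,
--     tokenized: List[str],
--     motifs: Dict[str, str]
-- ) -> str:
--     """
--     Create a visualization of how a sequence is tokenized.
--
--     Args:
--         sequence: Original sequence
--         tokenized: List of tokens
--         motifs: Dictionary of motif names to sequences
--
--     Returns:
--         str: Visualization string
--     """
--     # Create a mapping of positions to token boundaries
--     boundaries = set()
--     pos = 0
--     for token in tokenized:
--         boundaries.add(pos)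
--         pos += len(token)
--     boundaries.add(len(sequence))
--
--     # Create visualization
--     vis = []
--     vis.append(sequence)
--     vis.append(''.join('|' if i in boundaries else ' ' for i in range(len(sequence))))
--
--     # Add motif annotations
--     for name, motif in motifs.items():
--         if motif in sequence:
--             start = sequence.find(motif)
--             end = start + len(motif)
--             vis.append(' ' * start + '^' * len(motif) + ' ' * (len(sequence) - end))
--             vis.append(' ' * start + name + ' ' * (len(sequence) - end - len(name)))
--
--     return '\n'.join(vis)
-- ===== SOURCE B (Python) =====
-- def visualize_tokenization(sequence, tokenized, motifs):
--     n = len(sequence)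
--     # Collect the in-range token-start positions as a sorted, duplicate-free list.
--     # Prefix sums of token lengths are nondecreasing, so comparing against the
--     # last collected mark is enough to deduplicate and keep the list sorted.
--     marks = []
--     pos = 0
--     for token in tokenized:
--         if pos < n and (not marks or marks[-1] != pos):
--             marks.append(pos)
--         pos += len(token)
--     # Emit the boundary line as runs of spaces between consecutive marks.
--     pieces = []
--     prev = 0
--     for p in marks:
--         pieces.append(' ' * (p - prev))
--         pieces.append('|')
--         prev = p + 1
--     pieces.append(' ' * (n - prev))
--     lines = [sequence, ''.join(pieces)]
--     for name, motif in motifs.items():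
--         start = sequence.find(motif)
--         if start != -1:
--             end = start + len(motif)
--             lines.append(' ' * start + '^' * len(motif) + ' ' * (n - end))
--             lines.append(' ' * start + name + ' ' * (n - end - len(name)))
--     return '\n'.join(lines)
-- ===== Notes on version B (the rewrite author's own statement) =====
-- stated objective: alternative
-- what changed: B collects the in-range token-start positions as a sorted duplicate-free list (exploiting that prefix sums of token lengths are nondecreasing) and emits the boundary line as concatenated runs of spaces between consecutive marks, instead of A's position set plus a per-character set-membership scan over range(len(sequence)); the motif loop's redundant 'motif in sequence' check plus find() is collapsed into one find() call.
import Mathlib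
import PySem

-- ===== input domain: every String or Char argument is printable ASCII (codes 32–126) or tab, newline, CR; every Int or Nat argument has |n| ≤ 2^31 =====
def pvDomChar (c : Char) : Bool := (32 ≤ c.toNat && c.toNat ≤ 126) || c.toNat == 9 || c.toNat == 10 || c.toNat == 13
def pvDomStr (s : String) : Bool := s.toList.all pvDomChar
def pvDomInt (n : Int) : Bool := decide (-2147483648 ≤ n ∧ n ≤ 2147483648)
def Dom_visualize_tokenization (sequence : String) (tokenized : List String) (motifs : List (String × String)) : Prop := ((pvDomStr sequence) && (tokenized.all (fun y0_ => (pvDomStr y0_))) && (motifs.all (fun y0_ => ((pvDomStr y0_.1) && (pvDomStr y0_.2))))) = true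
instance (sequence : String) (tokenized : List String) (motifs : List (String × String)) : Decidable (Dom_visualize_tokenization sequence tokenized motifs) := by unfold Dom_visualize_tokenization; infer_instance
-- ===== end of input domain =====

-- B builds the boundary line from a sorted duplicate-free list of in-range token-start
-- positions, emitting runs of spaces between consecutive marks, instead of A's boundary set
-- plus a per-character membership scan; objective: alternative (same cost, different algorithm).

-- ===== PORT A =====
def visualize_tokenization (sequence : String) (tokenized : List String) (motifs : List (String × String)) : String :=
  -- boundaries = set(); pos = 0; for token in tokenized: boundaries.add(pos); pos += len(token)
  let st := tokenized.foldl
    (fun (st : PySem.Set Int × Int) token => (PySem.Set.add st.1 st.2, st.2 + PySem.Str.len token))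
    (PySem.Set.empty, 0)
  -- boundaries.add(len(sequence))
  let boundaries := PySem.Set.add st.1 (PySem.Str.len sequence)
  -- vis = [sequence, ''.join('|' if i in boundaries else ' ' for i in range(len(sequence)))]
  let line2 := String.ofList ((PySem.List.pyRange 0 (PySem.Str.len sequence) 1).map
      (fun i => if PySem.Set.contains boundaries i then '|' else ' '))
  let vis := [sequence, line2]
  -- for name, motif in motifs.items(): if motif in sequence: …
  let vis := (PySem.Dict.ofList motifs).items.foldl
    (fun (vis : List String) p =>
      if PySem.Str.isIn p.2 sequence then
        let start := PySem.Str.find sequence p.2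
        let e := start + PySem.Str.len p.2
        vis ++ [String.ofList (PySem.List.pyRepeat [' '] start ++ PySem.List.pyRepeat ['^'] (PySem.Str.len p.2)
                  ++ PySem.List.pyRepeat [' '] (PySem.Str.len sequence - e)),
                String.ofList (PySem.List.pyRepeat [' '] start ++ p.1.toList
                  ++ PySem.List.pyRepeat [' '] (PySem.Str.len sequence - e - PySem.Str.len p.1))]
      else vis) vis
  PySem.Str.join "\n" vis

-- ===== PORT B =====
def visualize_tokenization_alt (sequence : String) (tokenized : List String) (motifs : List (String × String)) : String :=
  let n := PySem.Str.len sequence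
  -- marks = []; pos = 0
  -- for token in tokenized: if pos < n and (not marks or marks[-1] != pos): marks.append(pos); pos += len(token)
  let stM := tokenized.foldl
    (fun (st : List Int × Int) token =>
      ((if st.2 < n ∧ (st.1 = [] ∨ PySem.List.pyGet? st.1 (-1) ≠ some st.2) then st.1 ++ [st.2] else st.1),
       st.2 + PySem.Str.len token))
    ([], 0)
  let marks := stM.1
  -- pieces = []; prev = 0; for p in marks: pieces.append(' '*(p-prev)); pieces.append('|'); prev = p+1
  let stP := marks.foldl
    (fun (st : List (List Char) × Int) p =>
      (st.1 ++ [PySem.List.pyRepeat [' '] (p - st.2), ['|']], p + 1))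
    ([], 0)
  -- pieces.append(' ' * (n - prev)); lines = [sequence, ''.join(pieces)]
  let pieces := stP.1 ++ [PySem.List.pyRepeat [' '] (n - stP.2)]
  let lines := [sequence, String.ofList pieces.flatten]
  -- for name, motif in motifs.items(): start = sequence.find(motif); if start != -1: …
  let lines := (PySem.Dict.ofList motifs).items.foldl
    (fun (lines : List String) p =>
      let start := PySem.Str.find sequence p.2
      if start ≠ -1 then
        let e := start + PySem.Str.len p.2
        lines ++ [String.ofList (PySem.List.pyRepeat [' '] start ++ PySem.List.pyRepeat ['^'] (PySem.Str.len p.2)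
                  ++ PySem.List.pyRepeat [' '] (n - e)),
                  String.ofList (PySem.List.pyRepeat [' '] start ++ p.1.toList
                  ++ PySem.List.pyRepeat [' '] (n - e - PySem.Str.len p.1))]
      else lines) lines
  PySem.Str.join "\n" lines

-- ===== PRECONDITION & SPEC =====
def Spec_visualize_tokenization (sequence : String) (tokenized : List String) (motifs : List (String × String)) (out : String) : Prop := out = visualize_tokenization_alt sequence tokenized motifs
instance (sequence : String) (tokenized : List String) (motifs : List (String × String)) (out : String) : Decidable (Spec_visualize_tokenization sequence tokenized motifs out) := by unfold Spec_visualize_tokenization; infer_instance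

-- ===== CLAIM (what is proved, stated in full; the proofs are below) =====
def Claim_equal_visualize_tokenization : Prop := ∀ (sequence : String) (tokenized : List String) (motifs : List (String × String)), Dom_visualize_tokenization sequence tokenized motifs → Spec_visualize_tokenization sequence tokenized motifs (visualize_tokenization sequence tokenized motifs)

-- ===== LEMMAS AND PROOFS =====

theorem pvContains_add_ne (S : PySem.Set Int) (p i : Int) (h : i ≠ p) :
    PySem.Set.contains (PySem.Set.add S p) i = PySem.Set.contains S i := by
  cases hc : PySem.Set.contains S i with
  | true =>
    rw [(PySem.Set.contains_iff _ i).mpr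
      ((PySem.Set.mem_add S p i).mpr (Or.inl ((PySem.Set.contains_iff S i).mp hc)))]
  | false =>
    cases hc' : PySem.Set.contains (PySem.Set.add S p) i with
    | false => rfl
    | true =>
      rcases (PySem.Set.mem_add S p i).mp ((PySem.Set.contains_iff _ i).mp hc') with h2 | h2
      · rw [(PySem.Set.contains_iff S i).mpr h2] at hc; exact absurd hc (by simp)
      · exact absurd h2 h

theorem pvContains_add (S : PySem.Set Int) (p i : Int) :
    PySem.Set.contains (PySem.Set.add S p) i = true ↔
      PySem.Set.contains S i = true ∨ i = p := by
  constructor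
  · intro h
    rcases (PySem.Set.mem_add S p i).mp ((PySem.Set.contains_iff _ i).mp h) with h2 | h2
    · exact Or.inl ((PySem.Set.contains_iff S i).mpr h2)
    · exact Or.inr h2
  · intro h
    refine (PySem.Set.contains_iff _ i).mpr ((PySem.Set.mem_add S p i).mpr ?_)
    rcases h with h | h
    · exact Or.inl ((PySem.Set.contains_iff S i).mp h)
    · exact Or.inr h

-- An element bounded by pos and distinct from the last element of a strictly sorted list is < pos.
theorem pvLt_of_last_ne (M : List Int) (pos : Int) (hP : M.Pairwise (· < ·))
    (hle : ∀ x ∈ M, x ≤ pos) (hne : M.getLast? ≠ some pos) : ∀ x ∈ M, x < pos := by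
  induction M with
  | nil => intro x hx; cases hx
  | cons a M ih =>
    intro x hx
    rcases List.mem_cons.mp hx with rfl | hx
    · cases M with
      | nil =>
        have : x ≠ pos := by
          intro h; exact hne (by simp [h, List.getLast?])
        exact lt_of_le_of_ne (hle x (by simp)) this
      | cons b M' =>
        have hab : x < b := (List.pairwise_cons.mp hP).1 b (by simp)
        have hbpos : b ≤ pos := hle b (by simp)
        omega
    · exact ih (List.pairwise_cons.mp hP).2 (fun y hy => hle y (List.mem_cons_of_mem _ hy))
        (by
          intro h
          apply hne
          rcases M with _ | ⟨b, M''⟩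
          · cases hx
          · rw [List.getLast?_cons_cons]; exact h) x hx

-- Joint invariant of A's boundary-set fold and B's sorted-mark-list fold.
theorem pvMarks_inv (n : Int) (ts : List String) :
    ∀ (S : PySem.Set Int) (M : List Int) (pos : Int), 0 ≤ pos →
    M.Pairwise (· < ·) →
    (∀ i ∈ M, 0 ≤ i ∧ i < n ∧ i ≤ pos) →
    (∀ i : Int, 0 ≤ i → i < n → (PySem.Set.contains S i = true ↔ i ∈ M)) →
    (let fa := ts.foldl (fun (st : PySem.Set Int × Int) t =>
        (PySem.Set.add st.1 st.2, st.2 + PySem.Str.len t)) (S, pos)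
     let fb := ts.foldl (fun (st : List Int × Int) t =>
        ((if st.2 < n ∧ (st.1 = [] ∨ PySem.List.pyGet? st.1 (-1) ≠ some st.2) then st.1 ++ [st.2] else st.1),
         st.2 + PySem.Str.len t)) (M, pos)
     fb.1.Pairwise (· < ·) ∧ (∀ i ∈ fb.1, 0 ≤ i ∧ i < n) ∧
     (∀ i : Int, 0 ≤ i → i < n → (PySem.Set.contains fa.1 i = true ↔ i ∈ fb.1))) := by
  induction ts with
  | nil =>
    intro S M pos _ hP hB hC
    exact ⟨hP, fun i hi => ⟨(hB i hi).1, (hB i hi).2.1⟩, hC⟩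
  | cons t ts ih =>
    intro S M pos hpos hP hB hC
    simp only [List.foldl_cons]
    have hlen : 0 ≤ PySem.Str.len t := by
      rw [PySem.Str.len_eq]; exact_mod_cast Nat.zero_le _
    by_cases hlt : pos < n ∧ (M = [] ∨ PySem.List.pyGet? M (-1) ≠ some pos)
    · rw [if_pos hlt]
      obtain ⟨hposn, hguard⟩ := hlt
      have hall : ∀ x ∈ M, x < pos := by
        rcases hguard with rfl | hguard
        · intro x hx; cases hx
        · rw [PySem.List.pyGet?_neg_one] at hguard
          exact pvLt_of_last_ne M pos hP (fun x hx => (hB x hx).2.2) hguard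
      apply ih (PySem.Set.add S pos) (M ++ [pos]) (pos + PySem.Str.len t) (by omega)
      · rw [List.pairwise_append]
        exact ⟨hP, List.pairwise_singleton _ _, fun x hx y hy => by
          rw [List.mem_singleton.mp hy]; exact hall x hx⟩
      · intro i hi
        rcases List.mem_append.mp hi with hi | hi
        · exact ⟨(hB i hi).1, (hB i hi).2.1, by have := (hB i hi).2.2; omega⟩
        · rw [List.mem_singleton.mp hi]; exact ⟨hpos, hposn, by omega⟩
      · intro i h0 hn
        rw [pvContains_add S pos i, hC i h0 hn, List.mem_append, List.mem_singleton]
    · rw [if_neg hlt]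
      have hlt' : pos < n → (M ≠ [] ∧ PySem.List.pyGet? M (-1) = some pos) := by
        intro h
        by_contra hc
        exact hlt ⟨h, by tauto⟩
      by_cases hposn : pos < n
      · -- pos < n, so M ≠ [] and marks[-1] = pos: pos is already in M
        obtain ⟨hMne, hlast⟩ := hlt' hposn
        have hmem : pos ∈ M := by
          rw [PySem.List.pyGet?_neg_one] at hlast
          exact List.mem_of_getLast? hlast
        apply ih (PySem.Set.add S pos) M (pos + PySem.Str.len t) (by omega) hP
        · intro i hi; exact ⟨(hB i hi).1, (hB i hi).2.1, by have := (hB i hi).2.2; omega⟩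
        · intro i h0 hn
          rw [pvContains_add S pos i, hC i h0 hn]
          exact ⟨fun h => h.elim id (fun he => he ▸ hmem), Or.inl⟩
      · -- pos ≥ n: the new boundary is out of range, M unchanged
        apply ih (PySem.Set.add S pos) M (pos + PySem.Str.len t) (by omega) hP
        · intro i hi; exact ⟨(hB i hi).1, (hB i hi).2.1, by have := (hB i hi).2.2; omega⟩
        · intro i h0 hn
          rw [pvContains_add S pos i, hC i h0 hn]
          exact ⟨fun h => h.elim id (fun he => by omega), Or.inl⟩

-- Rendering a strictly increasing list of marks as runs of spaces equals the per-position map.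
theorem pvRender (n : Int) : ∀ (M : List Int) (P : List (List Char)) (prev : Int),
    prev ≤ n → M.Pairwise (· < ·) → (∀ p ∈ M, prev ≤ p ∧ p < n) →
    (let g := M.foldl (fun (st : List (List Char) × Int) p =>
        (st.1 ++ [PySem.List.pyRepeat [' '] (p - st.2), ['|']], p + 1)) (P, prev)
     (g.1 ++ [PySem.List.pyRepeat [' '] (n - g.2)]).flatten
      = P.flatten ++ (PySem.List.pyRange prev n 1).map (fun i => if i ∈ M then '|' else ' ')) := by
  intro M
  induction M with
  | nil =>
    intro P prev hprev _ _
    simp only [List.foldl_nil, List.flatten_append, List.flatten_cons, List.flatten_nil,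
      List.append_nil, List.not_mem_nil, if_false]
    rw [PySem.List.pyRepeat_singleton, List.map_const', PySem.List.length_pyRange_one]
  | cons p M ih =>
    intro P prev hprev hP hB
    have hp : prev ≤ p ∧ p < n := hB p (by simp)
    have hPM := List.pairwise_cons.mp hP
    simp only [List.foldl_cons]
    rw [ih (P ++ [PySem.List.pyRepeat [' '] (p - prev), ['|']]) (p + 1) (by omega) hPM.2
      (fun q hq => ⟨by have := hPM.1 q hq; omega, (hB q (List.mem_cons_of_mem _ hq)).2⟩)]
    rw [PySem.List.pyRange_one_append prev p n hp.1 (by omega),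
        PySem.List.pyRange_one_cons hp.2]
    simp only [List.map_append, List.map_cons, List.flatten_append, List.flatten_cons,
      List.flatten_nil, List.append_nil, List.append_assoc]
    congr 1
    have h1 : (PySem.List.pyRange prev p 1).map (fun i => if i ∈ p :: M then '|' else ' ')
        = PySem.List.pyRepeat [' '] (p - prev) := by
      rw [PySem.List.pyRepeat_singleton]
      have : ∀ i ∈ PySem.List.pyRange prev p 1,
          (if i ∈ p :: M then '|' else ' ') = ' ' := by
        intro i hi
        rw [PySem.List.mem_pyRange_one] at hi
        rw [if_neg]
        intro hmem
        rcases List.mem_cons.mp hmem with rfl | hmem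
        · omega
        · have := hPM.1 i hmem; omega
      rw [List.map_congr_left this, List.map_const', PySem.List.length_pyRange_one]
    rw [h1]
    congr 1
    simp only [List.mem_cons, true_or, if_true, List.cons_append, List.nil_append]
    congr 1
    apply List.map_congr_left
    intro i hi
    rw [PySem.List.mem_pyRange_one] at hi
    exact (if_congr (or_iff_right (by omega : ¬ i = p)) rfl rfl).symm

-- A's `motif in sequence` test agrees with B's `sequence.find(motif) != -1` test.
theorem pvGuard (sequence m : String) :
    PySem.Str.isIn m sequence = decide (PySem.Str.find sequence m ≠ -1) := by
  by_cases hb : PySem.Str.isIn m sequence = true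
  · rw [hb, eq_comm, decide_eq_true_eq]
    exact (PySem.Str.find_ne_neg_one_iff sequence m).mpr ((PySem.Str.isIn_iff_infix m sequence).mp hb)
  · simp only [Bool.not_eq_true] at hb
    rw [hb, eq_comm, decide_eq_false_iff_not]
    intro hne
    have := (PySem.Str.isIn_iff_infix m sequence).mpr ((PySem.Str.find_ne_neg_one_iff sequence m).mp hne)
    rw [hb] at this; exact Bool.false_ne_true this

-- ===== VERDICT (by name: the statement is the Claim_ definition above) =====
theorem visualize_tokenization_spec : Claim_equal_visualize_tokenization := by
  intro sequence tokenized motifs _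
  unfold Spec_visualize_tokenization visualize_tokenization visualize_tokenization_alt
  dsimp only
  have hn : 0 ≤ PySem.Str.len sequence := by
    rw [PySem.Str.len_eq]; exact_mod_cast Nat.zero_le _
  -- the two token folds, named
  set n := PySem.Str.len sequence with hnn
  have hinv := pvMarks_inv n tokenized PySem.Set.empty [] 0 le_rfl (List.Pairwise.nil)
    (by intro i hi; cases hi)
    (by intro i _ _; constructor
        · intro h; exact absurd h (by rw [show PySem.Set.contains PySem.Set.empty i = false from rfl]; simp)
        · intro h; cases h)
  simp only at hinv
  obtain ⟨hPm, hBm, hCm⟩ := hinv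
  -- equality of the two boundary lines
  have hline :
      ((PySem.List.pyRange 0 n 1).map
        (fun i => if PySem.Set.contains
            (PySem.Set.add (tokenized.foldl (fun (st : PySem.Set Int × Int) t =>
              (PySem.Set.add st.1 st.2, st.2 + PySem.Str.len t)) (PySem.Set.empty, 0)).1 n) i
          then '|' else ' '))
      = (let g := ((tokenized.foldl (fun (st : List Int × Int) t =>
            ((if st.2 < n ∧ (st.1 = [] ∨ PySem.List.pyGet? st.1 (-1) ≠ some st.2) then st.1 ++ [st.2] else st.1),
             st.2 + PySem.Str.len t)) ([], 0)).1).foldl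
            (fun (st : List (List Char) × Int) p =>
              (st.1 ++ [PySem.List.pyRepeat [' '] (p - st.2), ['|']], p + 1)) ([], 0)
         (g.1 ++ [PySem.List.pyRepeat [' '] (n - g.2)]).flatten) := by
    rw [pvRender n _ [] 0 hn hPm (fun p hp => ⟨(hBm p hp).1, (hBm p hp).2⟩)]
    simp only [List.flatten_nil, List.nil_append]
    apply List.map_congr_left
    intro i hi
    rw [PySem.List.mem_pyRange_one] at hi
    rw [pvContains_add_ne _ n i (by omega)]
    by_cases h : i ∈ (tokenized.foldl (fun (st : List Int × Int) t =>
        ((if st.2 < n ∧ (st.1 = [] ∨ PySem.List.pyGet? st.1 (-1) ≠ some st.2) then st.1 ++ [st.2] else st.1),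
         st.2 + PySem.Str.len t)) ([], 0)).1
    · rw [if_pos ((hCm i (by omega) (by omega)).mpr h), if_pos h]
    · rw [if_neg (fun hc => h ((hCm i (by omega) (by omega)).mp hc)), if_neg h]
  rw [hline]
  -- the motif folds agree
  congr 1
  apply List.foldl_ext
  intro vis p _
  rw [pvGuard sequence p.2]
  by_cases h : PySem.Str.find sequence p.2 ≠ -1
  · rw [if_pos (by simpa using h), if_pos h]
  · rw [if_neg (by simpa using h), if_neg h]
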